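-- pv_equiv track=rewrite | github.com/BaoAdrian/interview-prep | coding-problems/leetcode/array-problems/sort_by_parity.py | sort_by_bitwise
-- ===== SOURCE A (Python) =====
-- def sort_by_bitwise(arr):
--     """ Beats 12% """
--     output = []
--     for num in sorted(arr):
--         if num & 1 == 0:
--             output.insert(0, num)
--         else:
--             output.append(num)
--     return output
-- ===== SOURCE B (Python) =====
-- def sort_by_bitwise(arr):
--     """Evens descending then odds ascending: partition first, then two keyed sorts."""
--     evens = sorted((x for x in arr if x & 1 == 0), key=lambda v: -v)
--     odds = sorted(x for x in arr if x & 1 != 0)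
--     return evens + odds
-- ===== Notes on version B (the rewrite author's own statement) =====
-- stated objective: faster
-- what changed: A sorts the whole list once and distributes each element by parity with insert(0)/append (quadratic bookkeeping); B partitions the list by parity first and performs two independent sorts (evens by key -v, odds plain), concatenating the results.
import Mathlib
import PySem

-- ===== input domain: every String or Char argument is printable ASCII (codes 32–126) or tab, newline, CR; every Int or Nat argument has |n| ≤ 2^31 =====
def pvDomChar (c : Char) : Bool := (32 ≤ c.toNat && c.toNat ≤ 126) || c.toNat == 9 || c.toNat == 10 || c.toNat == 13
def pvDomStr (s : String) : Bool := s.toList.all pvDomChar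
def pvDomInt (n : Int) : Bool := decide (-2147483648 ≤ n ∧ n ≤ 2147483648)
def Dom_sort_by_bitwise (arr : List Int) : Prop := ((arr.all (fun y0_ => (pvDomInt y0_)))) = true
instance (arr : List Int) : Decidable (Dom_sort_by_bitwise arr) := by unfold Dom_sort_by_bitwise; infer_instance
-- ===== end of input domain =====

-- B replaces A's sort-then-distribute (insert(0)/append) loop by a parity partition
-- followed by two independent keyed sorts; alternative decomposition, same result.


-- ===== PORT A =====
def sort_by_bitwise (arr : List Int) : List Int :=
  (PySem.List.sorted arr (fun x => x) false).foldl
    (fun output num =>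
      if PySem.Int.band num 1 == 0 then num :: output else output ++ [num]) []

-- ===== PORT B =====
def sort_by_bitwise_alt (arr : List Int) : List Int :=
  PySem.List.sorted (arr.filter (fun x => PySem.Int.band x 1 == 0)) (fun v => -v) false
    ++ PySem.List.sorted (arr.filter (fun x => !(PySem.Int.band x 1 == 0))) (fun x => x) false

-- ===== PRECONDITION & SPEC =====
def Spec_sort_by_bitwise (arr : List Int) (out : List Int) : Prop := out = sort_by_bitwise_alt arr
instance (arr : List Int) (out : List Int) : Decidable (Spec_sort_by_bitwise arr out) := by unfold Spec_sort_by_bitwise; infer_instance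

-- ===== CLAIM (what is proved, stated in full; the proofs are below) =====
def Claim_equal_sort_by_bitwise : Prop := ∀ (arr : List Int), Dom_sort_by_bitwise arr → Spec_sort_by_bitwise arr (sort_by_bitwise arr)

-- ===== LEMMAS AND PROOFS =====

-- A's loop: evens are prepended (so they accumulate in reverse order in front),
-- odds appended (in order at the back).
theorem foldA (l ev od : List Int) :
    l.foldl (fun output num =>
      if PySem.Int.band num 1 == 0 then num :: output else output ++ [num]) (ev ++ od)
      = ((l.filter (fun x => PySem.Int.band x 1 == 0)).reverse ++ ev)
        ++ (od ++ l.filter (fun x => !(PySem.Int.band x 1 == 0))) := by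
  induction l generalizing ev od with
  | nil => simp
  | cons x t ih =>
    simp only [List.foldl_cons]
    by_cases hx : (PySem.Int.band x 1 == 0) = true
    · rw [if_pos hx]
      have h1 : x :: (ev ++ od) = (x :: ev) ++ od := rfl
      rw [h1, ih (x :: ev) od]
      simp [List.filter_cons, hx]
    · rw [if_neg hx]
      have h1 : (ev ++ od) ++ [x] = ev ++ (od ++ [x]) := by simp
      rw [h1, ih ev (od ++ [x])]
      simp [List.filter_cons, hx]

-- sorting commutes with filtering (identity key)
theorem sorted_filter_comm (arr : List Int) (q : Int → Bool) :
    PySem.List.sorted (arr.filter q) (fun x => x) false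
      = (PySem.List.sorted arr (fun x => x) false).filter q := by
  apply PySem.List.sorted_id_eq_of_perm_of_pairwise
  · exact (PySem.List.sorted_perm arr (fun x => x) false).filter q
  · exact (PySem.List.sorted_pairwise arr (fun x => x)).filter q

-- sorting by the negation key is the reverse of the identity-key sort of the filtered list
theorem sorted_neg_filter (arr : List Int) (q : Int → Bool) :
    PySem.List.sorted (arr.filter q) (fun v => -v) false
      = ((PySem.List.sorted arr (fun x => x) false).filter q).reverse := by
  have hperm : (arr.filter q).Perm
      (((PySem.List.sorted arr (fun x => x) false).filter q).reverse) := by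
    exact ((((PySem.List.sorted_perm arr (fun x => x) false).filter q)).symm).trans
      ((List.reverse_perm _).symm)
  have h1 := PySem.List.sorted_eq_sorted_of_perm (arr.filter q)
      (((PySem.List.sorted arr (fun x => x) false).filter q).reverse)
      (fun v : Int => -v) (fun a b h => by simpa using h) hperm
  rw [h1]
  apply PySem.List.sorted_eq_self_of_pairwise
  rw [List.pairwise_reverse]
  exact ((PySem.List.sorted_pairwise arr (fun x => x)).filter q).imp
    (fun h => by simpa using h)

-- ===== VERDICT (by name: the statement is the Claim_ definition above) =====
theorem sort_by_bitwise_spec : Claim_equal_sort_by_bitwise := by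
  intro arr _
  unfold Spec_sort_by_bitwise sort_by_bitwise sort_by_bitwise_alt
  have h := foldA (PySem.List.sorted arr (fun x => x) false) [] []
  simp only [List.append_nil, List.nil_append] at h
  rw [h, sorted_filter_comm, sorted_neg_filter]
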